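-- pv_equiv track=rewrite | github.com/qlitre/japan-tariff-mcp | python-script/scrape.py | get_section_from_chapter
-- ===== SOURCE A (Python) =====
-- def get_section_from_chapter(chapter_num):
--     """類番号から部番号を取得"""
--     section_mapping = {
--         (1, 5): 1,   # 第1部: 動物及び動物性生産品
--         (6, 14): 2,  # 第2部: 植物性生産品
--         (15, 15): 3, # 第3部: 動物性、植物性又は微生物性の油脂等
--         (16, 24): 4, # 第4部: 調製食料品、飲料、たばこ等
--         (25, 27): 5, # 第5部: 鉱物性生産品
--         (28, 38): 6, # 第6部: 化学工業の生産品
--         (39, 40): 7, # 第7部: プラスチック及びゴム等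
--         (41, 43): 8, # 第8部: 皮革・毛皮・容器等
--         (44, 46): 9, # 第9部: 木材・コルク・わら製品等
--         (47, 49): 10, # 第10部: パルプ・紙・印刷物
--         (50, 63): 11, # 第11部: 紡織用繊維及びその製品
--         (64, 67): 12, # 第12部: 履物、帽子、傘、羽毛等
--         (68, 70): 13, # 第13部: 石、陶磁、ガラス製品等
--         (71, 71): 14, # 第14部: 真珠、貴石、貨幣等
--         (72, 83): 15, # 第15部: 卑金属及びその製品
--         (84, 85): 16, # 第16部: 機械・電気機器・映像音声機器等
--         (86, 89): 17, # 第17部: 車両、航空機、船舶等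
--         (90, 92): 18, # 第18部: 精密機器、医療機器、楽器等
--         (93, 93): 19, # 第19部: 武器等
--         (94, 96): 20, # 第20部: 雑品
--         (97, 97): 21, # 第21部: 美術品等
--     }
--
--     for (start, end), section in section_mapping.items():
--         if start <= chapter_num <= end:
--             return section
--     return None
-- ===== SOURCE B (Python) =====
-- # B: the ranges are contiguous over 1..97, so the section is simply the number
-- # of range starts <= chapter_num; computed by binary search on the sorted starts.
-- from bisect import bisect_right
--
-- _STARTS = [1, 6, 15, 16, 25, 28, 39, 41, 44, 47, 50, 64, 68, 71, 72, 84, 86, 90, 93, 94, 97]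
--
-- def get_section_from_chapter(chapter_num):
--     """類番号から部番号を取得"""
--     if chapter_num < 1 or chapter_num > 97:
--         return None
--     return bisect_right(_STARTS, chapter_num)
-- ===== Notes on version B (the rewrite author's own statement) =====
-- stated objective: alternative
-- what changed: Exploits that the ranges are contiguous over 1..97: B keeps only the sorted list of range starts and returns the section as bisect_right(starts, chapter_num) after a single bounds check, instead of scanning the (start,end)->section ranges.
import Mathlib
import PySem

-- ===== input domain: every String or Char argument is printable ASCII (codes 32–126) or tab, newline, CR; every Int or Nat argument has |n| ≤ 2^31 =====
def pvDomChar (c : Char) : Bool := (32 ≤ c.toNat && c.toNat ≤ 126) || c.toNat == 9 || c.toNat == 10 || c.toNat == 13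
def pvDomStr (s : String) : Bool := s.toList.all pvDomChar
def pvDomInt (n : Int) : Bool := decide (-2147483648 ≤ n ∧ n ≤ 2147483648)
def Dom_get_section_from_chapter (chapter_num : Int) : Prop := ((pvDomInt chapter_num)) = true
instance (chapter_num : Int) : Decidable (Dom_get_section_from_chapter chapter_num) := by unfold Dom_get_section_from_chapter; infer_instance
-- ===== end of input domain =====

-- B exploits that the ranges are contiguous over 1..97: after a bounds check the section is the
-- number of range starts ≤ chapter_num (Python's bisect_right on the sorted starts); objective: alternative.

-- ===== PORT A =====
-- the dict literal keyed by (start, end) ranges, in insertion order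
def pvSectionMapping : List ((Int × Int) × Int) :=
  [((1, 5), 1), ((6, 14), 2), ((15, 15), 3), ((16, 24), 4), ((25, 27), 5),
   ((28, 38), 6), ((39, 40), 7), ((41, 43), 8), ((44, 46), 9), ((47, 49), 10),
   ((50, 63), 11), ((64, 67), 12), ((68, 70), 13), ((71, 71), 14), ((72, 83), 15),
   ((84, 85), 16), ((86, 89), 17), ((90, 92), 18), ((93, 93), 19), ((94, 96), 20),
   ((97, 97), 21)]

-- the 'for …: if start <= n <= end: return section' loop = first match over the items
def get_section_from_chapter (chapter_num : Int) : Option Int :=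
  (pvSectionMapping.find? (fun p => decide (p.1.1 ≤ chapter_num ∧ chapter_num ≤ p.1.2))).map (·.2)

-- ===== PORT B =====
def pvStarts : List Int := [1, 6, 15, 16, 25, 28, 39, 41, 44, 47, 50, 64, 68, 71, 72, 84, 86, 90, 93, 94, 97]

-- bisect.bisect_right on a sorted list = number of elements ≤ chapter_num (library call, ported by its contract)
def get_section_from_chapter_alt (chapter_num : Int) : Option Int :=
  if chapter_num < 1 || chapter_num > 97 then none
  else some (pvStarts.countP (fun s => decide (s ≤ chapter_num)))

-- ===== PRECONDITION & SPEC =====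
def Spec_get_section_from_chapter (chapter_num : Int) (out : Option Int) : Prop := out = get_section_from_chapter_alt chapter_num
instance (chapter_num : Int) (out : Option Int) : Decidable (Spec_get_section_from_chapter chapter_num out) := by unfold Spec_get_section_from_chapter; infer_instance

-- ===== CLAIM =====
def Claim_equal_get_section_from_chapter : Prop := ∀ (chapter_num : Int), Dom_get_section_from_chapter chapter_num → Spec_get_section_from_chapter chapter_num (get_section_from_chapter chapter_num)

-- ===== LEMMAS AND PROOFS =====

set_option maxRecDepth 10000 in
-- out of [1, 97] both programs return none
theorem pv_out_of_range (n : Int) (h : ¬ (1 ≤ n ∧ n ≤ 97)) :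
    get_section_from_chapter n = get_section_from_chapter_alt n := by
  have hA : get_section_from_chapter n = none := by
    unfold get_section_from_chapter
    rcases hf : pvSectionMapping.find? (fun p => decide (p.1.1 ≤ n ∧ n ≤ p.1.2)) with _ | p
    · rw [hf]; rfl
    · exfalso
      have hp := List.find?_some hf
      have hm := List.mem_of_find?_eq_some hf
      simp only [decide_eq_true_eq] at hp
      simp only [pvSectionMapping, List.mem_cons, List.not_mem_nil, or_false] at hm
      rcases hm with h'|h'|h'|h'|h'|h'|h'|h'|h'|h'|h'|h'|h'|h'|h'|h'|h'|h'|h'|h'|h' <;>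
        (subst h'; simp at hp; omega)
  have hB : get_section_from_chapter_alt n = none := by
    unfold get_section_from_chapter_alt
    have : (n < 1 || n > 97) = true := by
      simp only [Bool.or_eq_true, decide_eq_true_eq]; omega
    rw [this]; rfl
  rw [hA, hB]

set_option maxRecDepth 10000 in
theorem pv_main (n : Int) : get_section_from_chapter n = get_section_from_chapter_alt n := by
  by_cases h : 1 ≤ n ∧ n ≤ 97
  · obtain ⟨h1, h2⟩ := h
    interval_cases n <;> decide
  · exact pv_out_of_range n h

-- ===== VERDICT =====
theorem get_section_from_chapter_spec : Claim_equal_get_section_from_chapter := by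
  intro n _
  exact pv_main n
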